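-- pv_equiv track=rewrite | github.com/im-glitchy/BrightBite | python_backend/app.py | determine_dental_safety
-- ===== SOURCE A (Python) =====
-- def determine_dental_safety(tags: list, has_braces: str = None, dietary_restrictions: str = None) -> str:
--     restrictions = []
--     if dietary_restrictions and dietary_restrictions != "none":
--         restrictions = [r.strip().lower() for r in dietary_restrictions.split(",")]
--
--     if "softonly" in restrictions:
--         if 'hard' in tags or 'chewy' in tags:
--             return 'avoid'
--
--     if "nohard" in restrictions and 'hard' in tags:
--         return 'avoid'
--
--     if "nosticky" in restrictions and 'sticky' in tags:
--         return 'avoid'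
--
--     if "nochewy" in restrictions and 'chewy' in tags:
--         return 'avoid'
--
--     if "nohot" in restrictions and 'hot' in tags:
--         return 'avoid'
--
--     if "nocold" in restrictions and 'cold' in tags:
--         return 'avoid'
--
--     if has_braces == "true":
--         if 'hard' in tags or 'sticky' in tags or 'chewy' in tags:
--             return 'avoid'
--
--     if 'hard' in tags or 'sticky' in tags or 'chewy' in tags:
--         return 'avoid'
--
--     if 'sugary' in tags or 'acidic' in tags:
--         return 'caution'
--
--     if 'hot' in tags:
--         return 'later'
--
--     return 'safe'
-- ===== SOURCE B (Python) =====
-- FORBIDDEN = {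
--     "softonly": ("hard", "chewy"),
--     "nohard": ("hard",),
--     "nosticky": ("sticky",),
--     "nochewy": ("chewy",),
--     "nohot": ("hot",),
--     "nocold": ("cold",),
-- }
--
--
-- def determine_dental_safety(tags: list, has_braces: str = None, dietary_restrictions: str = None) -> str:
--     banned = ["hard", "sticky", "chewy"]
--     if dietary_restrictions and dietary_restrictions != "none":
--         for r in dietary_restrictions.split(","):
--             banned.extend(FORBIDDEN.get(r.strip().lower(), ()))
--     if any(t in banned for t in tags):
--         return 'avoid'
--     if 'sugary' in tags or 'acidic' in tags:
--         return 'caution'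
--     if 'hot' in tags:
--         return 'later'
--     return 'safe'
-- ===== Notes on version B (the rewrite author's own statement) =====
-- stated objective: simpler
-- what changed: Replaces the six unrolled restriction branches and the redundant braces/general hard-sticky-chewy checks by a dict mapping each restriction keyword to its forbidden tags, from which one banned-tag list is built and tested in a single pass over the tags.
import Mathlib
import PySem

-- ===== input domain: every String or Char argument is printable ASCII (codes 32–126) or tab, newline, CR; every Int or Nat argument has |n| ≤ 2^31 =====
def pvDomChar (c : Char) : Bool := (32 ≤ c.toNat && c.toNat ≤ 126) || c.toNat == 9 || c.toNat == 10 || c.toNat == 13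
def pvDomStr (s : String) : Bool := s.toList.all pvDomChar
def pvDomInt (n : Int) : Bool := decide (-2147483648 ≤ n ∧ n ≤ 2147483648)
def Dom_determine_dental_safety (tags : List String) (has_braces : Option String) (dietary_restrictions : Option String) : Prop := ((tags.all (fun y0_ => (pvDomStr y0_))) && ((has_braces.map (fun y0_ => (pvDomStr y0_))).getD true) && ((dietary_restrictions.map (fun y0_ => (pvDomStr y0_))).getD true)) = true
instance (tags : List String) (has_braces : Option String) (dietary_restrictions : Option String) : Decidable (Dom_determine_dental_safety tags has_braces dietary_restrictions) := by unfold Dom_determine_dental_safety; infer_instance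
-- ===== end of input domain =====

-- B replaces A's six unrolled restriction branches by one table-driven pass that builds a single
-- banned-tag list and makes one pass over the tags (objective: simpler); same return value everywhere.

-- ===== PORT A =====
-- literal transliteration of Source A; s.split(",") has a non-empty separator, so split? is always `some`
def determine_dental_safety (tags : List String) (has_braces : Option String) (dietary_restrictions : Option String) : String :=
  let restrictions : List String :=
    match dietary_restrictions with
    | some s =>
        if s != "" && s != "none" then
          ((PySem.Str.split? s ",").getD []).map (fun r => PySem.Str.lower (PySem.Str.strip r))
        else []
    | none => []
  if restrictions.contains "softonly" && (tags.contains "hard" || tags.contains "chewy") then "avoid"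
  else if restrictions.contains "nohard" && tags.contains "hard" then "avoid"
  else if restrictions.contains "nosticky" && tags.contains "sticky" then "avoid"
  else if restrictions.contains "nochewy" && tags.contains "chewy" then "avoid"
  else if restrictions.contains "nohot" && tags.contains "hot" then "avoid"
  else if restrictions.contains "nocold" && tags.contains "cold" then "avoid"
  else if (has_braces == some "true") && (tags.contains "hard" || tags.contains "sticky" || tags.contains "chewy") then "avoid"
  else if tags.contains "hard" || tags.contains "sticky" || tags.contains "chewy" then "avoid"
  else if tags.contains "sugary" || tags.contains "acidic" then "caution"
  else if tags.contains "hot" then "later"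
  else "safe"

-- ===== PORT B =====
-- the module-level table of Source B
def FORBIDDEN : PySem.Dict String (List String) :=
  PySem.Dict.ofList
    [("softonly", ["hard", "chewy"]), ("nohard", ["hard"]), ("nosticky", ["sticky"]),
     ("nochewy", ["chewy"]), ("nohot", ["hot"]), ("nocold", ["cold"])]

-- literal transliteration of Source B: build one banned list, one pass over the tags
def determine_dental_safety_alt (tags : List String) (has_braces : Option String) (dietary_restrictions : Option String) : String :=
  let banned : List String :=
    match dietary_restrictions with
    | some s =>
        if s != "" && s != "none" then
          ((PySem.Str.split? s ",").getD []).foldl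
            (fun acc r => acc ++ FORBIDDEN.getD (PySem.Str.lower (PySem.Str.strip r)) [])
            ["hard", "sticky", "chewy"]
        else ["hard", "sticky", "chewy"]
    | none => ["hard", "sticky", "chewy"]
  if tags.any (fun t => banned.contains t) then "avoid"
  else if tags.contains "sugary" || tags.contains "acidic" then "caution"
  else if tags.contains "hot" then "later"
  else "safe"

-- ===== PRECONDITION & SPEC =====
def Spec_determine_dental_safety (tags : List String) (has_braces : Option String) (dietary_restrictions : Option String) (out : String) : Prop := out = determine_dental_safety_alt tags has_braces dietary_restrictions
instance (tags : List String) (has_braces : Option String) (dietary_restrictions : Option String) (out : String) : Decidable (Spec_determine_dental_safety tags has_braces dietary_restrictions out) := by unfold Spec_determine_dental_safety; infer_instance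

-- ===== CLAIM (what is proved, stated in full; the proofs are below) =====
def Claim_equal_determine_dental_safety : Prop := ∀ (tags : List String) (has_braces : Option String) (dietary_restrictions : Option String), Dom_determine_dental_safety tags has_braces dietary_restrictions → Spec_determine_dental_safety tags has_braces dietary_restrictions (determine_dental_safety tags has_braces dietary_restrictions)

-- ===== LEMMAS AND PROOFS =====

lemma pv_any_or {α : Type} (xs : List α) (p q : α → Bool) :
    xs.any (fun x => p x || q x) = (xs.any p || xs.any q) := by
  induction xs with
  | nil => rfl
  | cons x xs ih =>
      simp only [List.any_cons, ih]
      cases p x <;> cases q x <;> cases xs.any p <;> cases xs.any q <;> rfl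

lemma pv_any_and_const {α : Type} (xs : List α) (p : α → Bool) (c : Bool) :
    xs.any (fun x => p x && c) = (xs.any p && c) := by
  cases c <;> simp

lemma pv_any_comm {α β : Type} (xs : List α) (ys : List β) (f : α → β → Bool) :
    xs.any (fun x => ys.any (fun y => f x y)) = ys.any (fun y => xs.any (fun x => f x y)) := by
  induction xs with
  | nil => simp
  | cons x xs ih =>
      simp only [List.any_cons, ih, ← pv_any_or]

lemma pv_any_contains (tags l : List String) :
    tags.any (fun t => l.contains t) = l.any (fun k => tags.contains k) := by
  rw [show (fun t => l.contains t) = (fun t => l.any (fun x => x == t)) from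
        funext fun t => (List.any_beq').symm,
      pv_any_comm]
  exact congrArg l.any (funext fun x => List.any_beq)

lemma forb_mk : FORBIDDEN = PySem.Dict.mk
    [("softonly", ["hard", "chewy"]), ("nohard", ["hard"]), ("nosticky", ["sticky"]),
     ("nochewy", ["chewy"]), ("nohot", ["hot"]), ("nocold", ["cold"])] := by decide

lemma forb_get (r : String) : FORBIDDEN.getD r [] =
    (if r == "softonly" then ["hard", "chewy"] else if r == "nohard" then ["hard"]
     else if r == "nosticky" then ["sticky"] else if r == "nochewy" then ["chewy"]
     else if r == "nohot" then ["hot"] else if r == "nocold" then ["cold"] else []) := by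
  rw [forb_mk]
  simp only [PySem.Dict.getD, PySem.Dict.get?_mk_cons]
  split_ifs <;> simp_all [PySem.Dict.get?]

lemma pv_any_eq (tags : List String) (k : String) :
    (tags.any fun t => decide (t = k)) = decide (k ∈ tags) := by
  induction tags with
  | nil => simp
  | cons a l ih =>
      by_cases h : a = k
      · simp [h]
      · have hk : ¬k = a := fun hh => h hh.symm
        simp [h, hk, ih]

lemma pv_g_eq (r : String) (tags : List String) :
    tags.any (fun t => (FORBIDDEN.getD r []).contains t)
      = (((r == "softonly") && (tags.contains "hard" || tags.contains "chewy"))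
        || ((r == "nohard") && tags.contains "hard")
        || ((r == "nosticky") && tags.contains "sticky")
        || ((r == "nochewy") && tags.contains "chewy")
        || ((r == "nohot") && tags.contains "hot")
        || ((r == "nocold") && tags.contains "cold")) := by
  rw [forb_get]
  by_cases h1 : r = "softonly"
  · simp [h1, pv_any_or, pv_any_eq]
  by_cases h2 : r = "nohard"
  · simp [h1, h2, pv_any_or, pv_any_eq]
  by_cases h3 : r = "nosticky"
  · simp [h1, h2, h3, pv_any_or, pv_any_eq]
  by_cases h4 : r = "nochewy"
  · simp [h1, h2, h3, h4, pv_any_or, pv_any_eq]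
  by_cases h5 : r = "nohot"
  · simp [h1, h2, h3, h4, h5, pv_any_or, pv_any_eq]
  by_cases h6 : r = "nocold"
  · simp [h1, h2, h3, h4, h5, h6, pv_any_or, pv_any_eq]
  · have b1 : (r == "softonly") = false := by simp [h1]
    have b2 : (r == "nohard") = false := by simp [h2]
    have b3 : (r == "nosticky") = false := by simp [h3]
    have b4 : (r == "nochewy") = false := by simp [h4]
    have b5 : (r == "nohot") = false := by simp [h5]
    have b6 : (r == "nocold") = false := by simp [h6]
    simp [b1, b2, b3, b4, b5, b6]

lemma pv_any_key (R tags : List String) :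
    R.any (fun r => tags.any (fun t => (FORBIDDEN.getD r []).contains t))
      = ((R.contains "softonly" && (tags.contains "hard" || tags.contains "chewy"))
        || (R.contains "nohard" && tags.contains "hard")
        || (R.contains "nosticky" && tags.contains "sticky")
        || (R.contains "nochewy" && tags.contains "chewy")
        || (R.contains "nohot" && tags.contains "hot")
        || (R.contains "nocold" && tags.contains "cold")) := by
  have h : R.any (fun r => tags.any (fun t => (FORBIDDEN.getD r []).contains t))
      = R.any (fun r => (((r == "softonly") && (tags.contains "hard" || tags.contains "chewy"))
        || ((r == "nohard") && tags.contains "hard")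
        || ((r == "nosticky") && tags.contains "sticky")
        || ((r == "nochewy") && tags.contains "chewy")
        || ((r == "nohot") && tags.contains "hot")
        || ((r == "nocold") && tags.contains "cold"))) := by
    exact congrArg R.any (funext fun r => pv_g_eq r tags)
  rw [h]
  simp only [pv_any_or, pv_any_and_const, List.any_beq']

lemma pv_avoidB (R tags : List String) :
    tags.any (fun t => (R.foldl (fun acc r => acc ++ FORBIDDEN.getD r []) ["hard", "sticky", "chewy"]).contains t)
      = ((tags.contains "hard" || tags.contains "sticky" || tags.contains "chewy")
        || ((R.contains "softonly" && (tags.contains "hard" || tags.contains "chewy"))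
        || (R.contains "nohard" && tags.contains "hard")
        || (R.contains "nosticky" && tags.contains "sticky")
        || (R.contains "nochewy" && tags.contains "chewy")
        || (R.contains "nohot" && tags.contains "hot")
        || (R.contains "nocold" && tags.contains "cold"))) := by
  have hc : ∀ base t, (R.foldl (fun acc r => acc ++ FORBIDDEN.getD r []) base).contains t
      = (base.contains t || R.any (fun r => (FORBIDDEN.getD r []).contains t)) := by
    induction R with
    | nil => intro base t; simp
    | cons r R ih =>
        intro base t
        simp only [List.foldl_cons, List.any_cons, ih, List.contains_append]
        cases base.contains t <;> cases (FORBIDDEN.getD r []).contains t <;> simp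
  have h1 : tags.any (fun t => (R.foldl (fun acc r => acc ++ FORBIDDEN.getD r []) ["hard", "sticky", "chewy"]).contains t)
      = tags.any (fun t => ((["hard", "sticky", "chewy"] : List String).contains t
          || R.any (fun r => (FORBIDDEN.getD r []).contains t))) := by
    exact congrArg tags.any (funext fun t => hc _ t)
  rw [h1, pv_any_or, pv_any_comm, pv_any_key]
  congr 1
  rw [pv_any_contains]
  simp [Bool.or_assoc]

lemma pv_if_or (a b : Bool) (v e : String) :
    (if a then v else if b then v else e) = (if a || b then v else e) := by
  cases a <;> cases b <;> simp

-- the whole cascade as one if, proved by collapsing the avoid branches and exhausting the booleans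
lemma pv_form (rs rh rsk rc rht rcd hb th tsk tc tht tcd tsg tac : Bool) :
    (if rs && (th || tc) then "avoid"
     else if rh && th then "avoid"
     else if rsk && tsk then "avoid"
     else if rc && tc then "avoid"
     else if rht && tht then "avoid"
     else if rcd && tcd then "avoid"
     else if hb && (th || tsk || tc) then "avoid"
     else if th || tsk || tc then "avoid"
     else if tsg || tac then "caution"
     else if tht then "later"
     else "safe")
    = (if ((th || tsk || tc)
          || ((rs && (th || tc)) || (rh && th) || (rsk && tsk) || (rc && tc) || (rht && tht) || (rcd && tcd))) then "avoid"
       else if tsg || tac then "caution"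
       else if tht then "later"
       else "safe") := by
  rw [pv_if_or, pv_if_or, pv_if_or, pv_if_or, pv_if_or, pv_if_or, pv_if_or]
  congr 1
  cases rs <;> cases rh <;> cases rsk <;> cases rc <;> cases rht <;> cases rcd <;> cases hb <;>
    cases th <;> cases tsk <;> cases tc <;> cases tht <;> cases tcd <;> rfl

-- A''s cascade equals B''s single pass, for an already-parsed restriction list R
lemma pv_core (tags R : List String) (hb : Bool) :
    (if R.contains "softonly" && (tags.contains "hard" || tags.contains "chewy") then "avoid"
     else if R.contains "nohard" && tags.contains "hard" then "avoid"
     else if R.contains "nosticky" && tags.contains "sticky" then "avoid"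
     else if R.contains "nochewy" && tags.contains "chewy" then "avoid"
     else if R.contains "nohot" && tags.contains "hot" then "avoid"
     else if R.contains "nocold" && tags.contains "cold" then "avoid"
     else if hb && (tags.contains "hard" || tags.contains "sticky" || tags.contains "chewy") then "avoid"
     else if tags.contains "hard" || tags.contains "sticky" || tags.contains "chewy" then "avoid"
     else if tags.contains "sugary" || tags.contains "acidic" then "caution"
     else if tags.contains "hot" then "later"
     else "safe")
    = (if tags.any (fun t => (R.foldl (fun acc r => acc ++ FORBIDDEN.getD r []) ["hard", "sticky", "chewy"]).contains t) then "avoid"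
       else if tags.contains "sugary" || tags.contains "acidic" then "caution"
       else if tags.contains "hot" then "later"
       else "safe") := by
  rw [pv_avoidB]
  exact pv_form (R.contains "softonly") (R.contains "nohard") (R.contains "nosticky")
    (R.contains "nochewy") (R.contains "nohot") (R.contains "nocold") hb
    (tags.contains "hard") (tags.contains "sticky") (tags.contains "chewy")
    (tags.contains "hot") (tags.contains "cold") (tags.contains "sugary") (tags.contains "acidic")

-- ===== VERDICT (by name: the statement is the Claim_ definition above) =====
theorem determine_dental_safety_spec : Claim_equal_determine_dental_safety := by
  intro tags has_braces dietary_restrictions _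
  unfold Spec_determine_dental_safety determine_dental_safety determine_dental_safety_alt
  cases dietary_restrictions with
  | none => exact pv_core tags [] (has_braces == some "true")
  | some s =>
      cases hcond : (s != "" && s != "none") with
      | false =>
          simp only [hcond]
          exact pv_core tags [] (has_braces == some "true")
      | true =>
          simp only [hcond]
          have hcore := pv_core tags
            (((PySem.Str.split? s ",").getD []).map (fun r => PySem.Str.lower (PySem.Str.strip r)))
            (has_braces == some "true")
          rw [List.foldl_map] at hcore
          exact hcore
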